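-- pv_equiv track=rewrite | github.com/anu-coder/Intensive-python | exercises/first_vowel_in_each_word.py | find_first_vowel
-- ===== SOURCE A (Python) =====
-- def find_first_vowel(S: str) -> str:
--     """ Return the first vowel in each word of a string.
--
--     >>> find_first_vowel("The sky's the limit")
--     'e, e, i'
--     """
--     vowels = ['a', 'e', 'i', 'o', 'u']
--
--     words = S.split(' ')
--     res = []
--     for w in words:
--         for l in w:
--             if l in vowels:
--                 res.append(l)
--                 break
--             else: continue
--
--
--     res = ', '.join(res)
--     return(res)
-- ===== SOURCE B (Python) =====
-- def find_first_vowel(S: str) -> str: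
--     """Return the first vowel in each word of a string (comprehension pipeline)."""
--     vowel_runs = ([c for c in w if c in 'aeiou'] for w in S.split(' '))
--     return ', '.join(v[0] for v in vowel_runs if v)
-- ===== Notes on version B (the rewrite author's own statement) =====
-- stated objective: idiomatic
-- what changed: Replaces the explicit nested loops with break and a mutable accumulator by a comprehension pipeline: filter each word down to its vowels, keep the head of each non-empty run, and join once.
import Mathlib
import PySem

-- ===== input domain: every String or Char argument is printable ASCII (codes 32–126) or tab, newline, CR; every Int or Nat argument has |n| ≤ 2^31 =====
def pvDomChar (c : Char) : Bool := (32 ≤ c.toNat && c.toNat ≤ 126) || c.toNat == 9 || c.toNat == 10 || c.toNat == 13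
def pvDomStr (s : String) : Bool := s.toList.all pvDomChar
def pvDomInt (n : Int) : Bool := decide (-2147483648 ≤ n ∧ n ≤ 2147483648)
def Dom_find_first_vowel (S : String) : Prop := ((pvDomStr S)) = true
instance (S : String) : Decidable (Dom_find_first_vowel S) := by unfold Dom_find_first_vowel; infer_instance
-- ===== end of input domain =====

-- B replaces A's nested loops/break/accumulator by a filter-head comprehension pipeline (idiomatic; same cost).

-- ===== PORT A =====
def pvVowels : List Char := ['a', 'e', 'i', 'o', 'u']

-- inner 'for l in w: if l in vowels: res.append(l); break'
def pvInnerA (res : List String) : List Char → List String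
  | [] => res
  | c :: cs => if c ∈ pvVowels then res ++ [String.ofList [c]] else pvInnerA res cs

def find_first_vowel (S : String) : String :=
  let words := PySem.Chars.splitOn S.toList [' ']
  let res := words.foldl (fun res w => pvInnerA res w) []
  PySem.Str.join ", " res

-- ===== PORT B =====
def find_first_vowel_alt (S : String) : String :=
  PySem.Str.join ", "
    (((PySem.Chars.splitOn S.toList [' ']).map
        (fun w => w.filter (fun c => c ∈ "aeiou".toList))).filterMap
      (fun v => v.head?.map (fun c => String.ofList [c])))

-- ===== PRECONDITION & SPEC =====
def Spec_find_first_vowel (S : String) (out : String) : Prop := out = find_first_vowel_alt S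
instance (S : String) (out : String) : Decidable (Spec_find_first_vowel S out) := by unfold Spec_find_first_vowel; infer_instance

-- ===== CLAIM (what is proved, stated in full; the proofs are below) =====
def Claim_equal_find_first_vowel : Prop := ∀ (S : String), Dom_find_first_vowel S → Spec_find_first_vowel S (find_first_vowel S)

-- ===== LEMMAS AND PROOFS =====

theorem pvVowels_toList : "aeiou".toList = pvVowels := by decide

theorem pvInnerA_eq (cs : List Char) (res : List String) :
    pvInnerA res cs =
      res ++ (((cs.find? (fun c => decide (c ∈ pvVowels))).map (fun c => String.ofList [c])).toList) := by
  induction cs generalizing res with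
  | nil => simp [pvInnerA]
  | cons c cs ih =>
    by_cases h : c ∈ pvVowels
    all_goals simp [pvInnerA, h, ih]

theorem pvFoldA_eq (ws : List (List Char)) (acc : List String) :
    ws.foldl (fun res w => pvInnerA res w) acc =
      acc ++ ws.filterMap
        (fun w => ((w.find? (fun c => decide (c ∈ pvVowels))).map (fun c => String.ofList [c]))) := by
  induction ws generalizing acc with
  | nil => simp
  | cons w ws ih =>
    rw [List.foldl_cons, pvInnerA_eq, ih, List.filterMap_cons]
    cases ((w.find? (fun c => decide (c ∈ pvVowels))).map (fun c => String.ofList [c])) <;> simp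

-- ===== VERDICT (by name: the statement is the Claim_ definition above) =====
theorem find_first_vowel_spec : Claim_equal_find_first_vowel := by
  intro S _
  unfold Spec_find_first_vowel
  rw [find_first_vowel, find_first_vowel_alt, pvFoldA_eq]
  simp [pvVowels_toList]
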